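-- pv_equiv track=rewrite | github.com/lkopi/rat_tracking | annotation.py | find_nearest_reliable_annotation
-- ===== SOURCE A (Python) =====
-- def find_nearest_reliable_annotation(current_frame_id, n_frames, marked_set):
--     preceding_frame_ids = list(range(current_frame_id-1, -1, -1))
--     subsequent_frame_ids = list(range(current_frame_id + 1, n_frames))
--
--     nearest_preceding_frame = next((x for x in preceding_frame_ids if x not in marked_set), -1)
--     nearest_subsequent_frame = next((x for x in subsequent_frame_ids if x not in marked_set), -1)
--
--     if nearest_preceding_frame == -1:
--         nearest_frame_id = nearest_subsequent_frame
--     elif nearest_subsequent_frame == -1: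
--         nearest_frame_id = nearest_preceding_frame
--     else:
--         nearest_frame_id = nearest_preceding_frame \
--             if abs(nearest_preceding_frame - current_frame_id) <= abs(nearest_subsequent_frame - current_frame_id) \
--             else nearest_subsequent_frame
--
--     return nearest_frame_id, nearest_preceding_frame, nearest_subsequent_frame
-- ===== SOURCE B (Python) =====
-- def find_nearest_reliable_annotation(current_frame_id, n_frames, marked_set):
--     marked = set(marked_set)
--     pre = sub = nearest = None
--     d = 1
--     while (pre is None or sub is None) and (current_frame_id - d >= 0 or current_frame_id + d < n_frames):
--         p = current_frame_id - d
--         if pre is None and p >= 0 and p not in marked: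
--             pre = p
--             if nearest is None:
--                 nearest = p
--         s = current_frame_id + d
--         if sub is None and s < n_frames and s not in marked:
--             sub = s
--             if nearest is None:
--                 nearest = s
--         d += 1
--     return (nearest if nearest is not None else -1,
--             pre if pre is not None else -1,
--             sub if sub is not None else -1)
-- ===== Notes on version B (the rewrite author's own statement) =====
-- stated objective: alternative
-- what changed: Replaced A's two materialized range lists each scanned left-to-right with linear list-membership tests by a single bidirectional expanding-ring loop over a hash set that examines distance 1,2,... outward (preceding side first to keep the <= tie-break) and stops as soon as both directions are resolved.
import Mathlib
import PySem

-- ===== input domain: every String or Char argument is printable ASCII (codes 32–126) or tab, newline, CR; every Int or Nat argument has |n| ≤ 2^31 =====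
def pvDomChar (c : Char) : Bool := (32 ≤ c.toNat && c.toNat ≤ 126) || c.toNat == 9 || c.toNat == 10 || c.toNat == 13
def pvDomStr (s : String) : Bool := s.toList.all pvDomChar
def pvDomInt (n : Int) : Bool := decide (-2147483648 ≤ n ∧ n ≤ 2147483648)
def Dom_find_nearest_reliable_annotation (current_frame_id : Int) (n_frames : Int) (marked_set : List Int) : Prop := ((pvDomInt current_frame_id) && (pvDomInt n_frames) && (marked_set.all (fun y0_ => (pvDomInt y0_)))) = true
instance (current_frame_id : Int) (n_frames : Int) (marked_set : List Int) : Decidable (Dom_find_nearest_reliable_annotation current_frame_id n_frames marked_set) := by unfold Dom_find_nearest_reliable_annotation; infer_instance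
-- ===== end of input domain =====

-- B replaces A's two materialized range lists (each scanned with a linear `in marked_set` test)
-- by a single bidirectional expanding-ring loop over a set that stops once both directions are
-- resolved (alternative algorithm, equal return value everywhere).

-- ===== PORT A =====
def find_nearest_reliable_annotation (current_frame_id : Int) (n_frames : Int) (marked_set : List Int) : Int × Int × Int :=
  let preceding_frame_ids := PySem.List.pyRange (current_frame_id - 1) (-1) (-1)
  let subsequent_frame_ids := PySem.List.pyRange (current_frame_id + 1) n_frames 1
  let nearest_preceding_frame := (preceding_frame_ids.find? (fun x => !(marked_set.contains x))).getD (-1)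
  let nearest_subsequent_frame := (subsequent_frame_ids.find? (fun x => !(marked_set.contains x))).getD (-1)
  let nearest_frame_id :=
    if nearest_preceding_frame = -1 then nearest_subsequent_frame
    else if nearest_subsequent_frame = -1 then nearest_preceding_frame
    else if |nearest_preceding_frame - current_frame_id| ≤ |nearest_subsequent_frame - current_frame_id|
         then nearest_preceding_frame else nearest_subsequent_frame
  (nearest_frame_id, nearest_preceding_frame, nearest_subsequent_frame)

-- ===== PORT B =====
-- the while loop of Source B, fuel-bounded (the fuel is a pure totality guard: the loop's own
-- stop condition always fires before the fuel runs out, see ringFuel below)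
def ringLoop (c n : Int) (marked : PySem.Set Int) :
    Nat → Int → Option Int → Option Int → Option Int → Option Int × Option Int × Option Int
  | 0, _, pre, sub, near => (pre, sub, near)
  | f+1, d, pre, sub, near =>
    if (pre = none ∨ sub = none) ∧ (0 ≤ c - d ∨ c + d < n) then
      let p := c - d
      let pre' := if pre = none ∧ 0 ≤ p ∧ p ∉ marked then some p else pre
      let near' := if pre = none ∧ 0 ≤ p ∧ p ∉ marked then (if near = none then some p else near) else near
      let s := c + d
      let sub' := if sub = none ∧ s < n ∧ s ∉ marked then some s else sub
      let near'' := if sub = none ∧ s < n ∧ s ∉ marked then (if near' = none then some s else near') else near'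
      ringLoop c n marked f (d+1) pre' sub' near''
    else (pre, sub, near)

def ringFuel (c n : Int) : Nat := (max c (n - 1 - c)).toNat + 1

def find_nearest_reliable_annotation_alt (current_frame_id : Int) (n_frames : Int) (marked_set : List Int) : Int × Int × Int :=
  let marked := PySem.Set.ofList marked_set
  let st := ringLoop current_frame_id n_frames marked (ringFuel current_frame_id n_frames) 1 none none none
  (st.2.2.getD (-1), st.1.getD (-1), st.2.1.getD (-1))

-- ===== PRECONDITION & SPEC =====
def Spec_find_nearest_reliable_annotation (current_frame_id : Int) (n_frames : Int) (marked_set : List Int) (out : Int × Int × Int) : Prop := out = find_nearest_reliable_annotation_alt current_frame_id n_frames marked_set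
instance (current_frame_id : Int) (n_frames : Int) (marked_set : List Int) (out : Int × Int × Int) : Decidable (Spec_find_nearest_reliable_annotation current_frame_id n_frames marked_set out) := by unfold Spec_find_nearest_reliable_annotation; infer_instance

-- ===== CLAIM (what is proved, stated in full; the proofs are below) =====
def Claim_equal_find_nearest_reliable_annotation : Prop := ∀ (current_frame_id : Int) (n_frames : Int) (marked_set : List Int), Dom_find_nearest_reliable_annotation current_frame_id n_frames marked_set → Spec_find_nearest_reliable_annotation current_frame_id n_frames marked_set (find_nearest_reliable_annotation current_frame_id n_frames marked_set)

-- ===== LEMMAS AND PROOFS =====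

-- first unmarked frame in x, x-1, ..., 0 (none if x < 0 or all marked)
def firstDown (S : List Int) (x : Int) : Option Int :=
  if h : x < 0 then none
  else if x ∈ S then firstDown S (x - 1) else some x
termination_by (x + 1).toNat
decreasing_by omega

-- first unmarked frame in x, x+1, ..., n-1 (none if x ≥ n or all marked)
def firstUp (S : List Int) (n x : Int) : Option Int :=
  if h : x < n then
    (if x ∈ S then firstUp S n (x + 1) else some x)
  else none
termination_by (n - x).toNat
decreasing_by omega

lemma firstDown_bounds (S : List Int) (x p : Int) (h : firstDown S x = some p) :
    0 ≤ p ∧ p ≤ x ∧ p ∉ S := by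
  fun_induction firstDown S x with
  | case1 x hx => simp at h
  | case2 x hx hm ih =>
    rcases ih h with ⟨h1, h2, h3⟩
    exact ⟨h1, by omega, h3⟩
  | case3 x hx hm =>
    simp only [Option.some.injEq] at h
    subst h; exact ⟨by omega, le_refl _, hm⟩

lemma firstUp_bounds (S : List Int) (n x s : Int) (h : firstUp S n x = some s) :
    x ≤ s ∧ s < n ∧ s ∉ S := by
  fun_induction firstUp S n x with
  | case1 x hx hm ih =>
    rcases ih h with ⟨h1, h2, h3⟩
    exact ⟨by omega, h2, h3⟩
  | case2 x hx hm =>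
    simp only [Option.some.injEq] at h
    subst h; exact ⟨le_refl _, hx, hm⟩
  | case3 x hx => simp at h

lemma firstDown_of_neg (S : List Int) (x : Int) (h : x < 0) : firstDown S x = none := by
  rw [firstDown]; simp [h]

lemma firstUp_of_ge (S : List Int) (n x : Int) (h : n ≤ x) : firstUp S n x = none := by
  rw [firstUp]; simp [show ¬ x < n by omega]

lemma find?_pyRange_down (S : List Int) (x : Int) :
    (PySem.List.pyRange x (-1) (-1)).find? (fun y => !(S.contains y)) = firstDown S x := by
  fun_induction firstDown S x with
  | case1 x hx =>
    rw [PySem.List.pyRange_neg_one_eq_nil (by omega)]; rfl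
  | case2 x hx hm ih =>
    rw [PySem.List.pyRange_neg_one_cons (by omega)]
    simp only [List.find?_cons]
    simp only [List.contains_eq_mem] at ih ⊢
    simp [hm, ih]
  | case3 x hx hm =>
    rw [PySem.List.pyRange_neg_one_cons (by omega)]
    simp only [List.find?_cons]
    simp only [List.contains_eq_mem]
    simp [hm]

lemma find?_pyRange_up (S : List Int) (n x : Int) :
    (PySem.List.pyRange x n 1).find? (fun y => !(S.contains y)) = firstUp S n x := by
  fun_induction firstUp S n x with
  | case1 x hx hm ih =>
    rw [PySem.List.pyRange_one_cons hx]
    simp only [List.find?_cons]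
    simp only [List.contains_eq_mem] at ih ⊢
    simp [hm, ih]
  | case2 x hx hm =>
    rw [PySem.List.pyRange_one_cons hx]
    simp only [List.find?_cons]
    simp only [List.contains_eq_mem]
    simp [hm]
  | case3 x hx =>
    rw [PySem.List.pyRange_one_eq_nil (by omega)]; rfl

-- how A combines the two directional answers, on the Option level (ties go to preceding)
def combine (c : Int) : Option Int → Option Int → Option Int
  | none, o => o
  | some p, none => some p
  | some p, some s => some (if c - p ≤ s - c then p else s)

lemma ringLoop_full (c n : Int) (S : List Int) (f : Nat) (d p s : Int) (m : Option Int) :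
    ringLoop c n S f d (some p) (some s) m = (some p, some s, m) := by
  cases f with
  | zero => rfl
  | succ f => simp [ringLoop]

lemma ringLoop_pre (c n : Int) (S : List Int) (f : Nat) (d p m : Int)
    (hf : n ≤ c + d + f) :
    ringLoop c n S f d (some p) none (some m) = (some p, firstUp S n (c + d), some m) := by
  induction f generalizing d with
  | zero =>
    rw [firstUp_of_ge S n (c + d) (by omega)]; rfl
  | succ f ih =>
    rw [ringLoop]
    simp only [reduceCtorEq, false_or, true_and, false_and, if_false, ite_self]
    by_cases hc : 0 ≤ c - d ∨ c + d < n
    · rw [if_pos hc]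
      by_cases hq : c + d < n ∧ c + d ∉ S
      · rw [if_pos hq, ringLoop_full]
        rw [firstUp, dif_pos hq.1, if_neg hq.2]
      · rw [if_neg hq, ih (d + 1) (by omega)]
        have hfu : firstUp S n (c + d) = firstUp S n (c + (d + 1)) := by
          by_cases hlt : c + d < n
          · have hm : c + d ∈ S := by by_contra hmm; exact hq ⟨hlt, hmm⟩
            rw [firstUp, dif_pos hlt, if_pos hm]; ring_nf
          · rw [firstUp_of_ge S n (c + d) (by omega),
                firstUp_of_ge S n (c + (d + 1)) (by omega)]
        rw [hfu]
    · rw [if_neg hc]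
      rw [firstUp_of_ge S n (c + d) (by omega)]

lemma ringLoop_sub (c n : Int) (S : List Int) (f : Nat) (d s m : Int)
    (hf : c < d + f) :
    ringLoop c n S f d none (some s) (some m) = (firstDown S (c - d), some s, some m) := by
  induction f generalizing d with
  | zero =>
    rw [firstDown_of_neg S (c - d) (by omega)]; rfl
  | succ f ih =>
    rw [ringLoop]
    simp only [reduceCtorEq, or_false, true_and, false_and, if_false, ite_self]
    by_cases hc : 0 ≤ c - d ∨ c + d < n
    · rw [if_pos hc]
      by_cases hp : 0 ≤ c - d ∧ c - d ∉ S
      · rw [if_pos hp, ringLoop_full]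
        rw [firstDown, dif_neg (show ¬ c - d < 0 by omega), if_neg hp.2]
      · rw [if_neg hp, ih (d + 1) (by omega)]
        have hfd : firstDown S (c - d) = firstDown S (c - (d + 1)) := by
          by_cases hlt : 0 ≤ c - d
          · have hm : c - d ∈ S := by by_contra hmm; exact hp ⟨hlt, hmm⟩
            rw [firstDown, dif_neg (show ¬ c - d < 0 by omega), if_pos hm]; ring_nf
          · rw [firstDown_of_neg S (c - d) (by omega),
                firstDown_of_neg S (c - (d + 1)) (by omega)]
        rw [hfd]
    · rw [if_neg hc]
      rw [firstDown_of_neg S (c - d) (by omega)]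

lemma ringLoop_none (c n : Int) (S : List Int) (f : Nat) (d : Int)
    (hfp : n ≤ c + d + f) (hfs : c < d + f) :
    ringLoop c n S f d none none none =
      (firstDown S (c - d), firstUp S n (c + d),
       combine c (firstDown S (c - d)) (firstUp S n (c + d))) := by
  induction f generalizing d with
  | zero =>
    rw [firstDown_of_neg S (c - d) (by omega), firstUp_of_ge S n (c + d) (by omega)]
    rfl
  | succ f ih =>
    have hfd_step : ¬ (0 ≤ c - d ∧ c - d ∉ S) → firstDown S (c - d) = firstDown S (c - (d + 1)) := by
      intro hp
      by_cases hlt : 0 ≤ c - d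
      · have hm : c - d ∈ S := by by_contra hmm; exact hp ⟨hlt, hmm⟩
        rw [firstDown, dif_neg (show ¬ c - d < 0 by omega), if_pos hm]; ring_nf
      · rw [firstDown_of_neg S (c - d) (by omega),
            firstDown_of_neg S (c - (d + 1)) (by omega)]
    have hfu_step : ¬ (c + d < n ∧ c + d ∉ S) → firstUp S n (c + d) = firstUp S n (c + (d + 1)) := by
      intro hq
      by_cases hlt : c + d < n
      · have hm : c + d ∈ S := by by_contra hmm; exact hq ⟨hlt, hmm⟩
        rw [firstUp, dif_pos hlt, if_pos hm]; ring_nf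
      · rw [firstUp_of_ge S n (c + d) (by omega),
            firstUp_of_ge S n (c + (d + 1)) (by omega)]
    rw [ringLoop]
    simp only [true_or, true_and, if_true]
    by_cases hc : 0 ≤ c - d ∨ c + d < n
    · rw [if_pos hc]
      by_cases hp : 0 ≤ c - d ∧ c - d ∉ S
      · have hfd : firstDown S (c - d) = some (c - d) := by
          rw [firstDown, dif_neg (show ¬ c - d < 0 by omega), if_neg hp.2]
        rw [if_pos hp]
        simp only [reduceCtorEq, if_false, ite_self]
        by_cases hq : c + d < n ∧ c + d ∉ S
        · have hfu : firstUp S n (c + d) = some (c + d) := by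
            rw [firstUp, dif_pos hq.1, if_neg hq.2]
          rw [if_pos hq, ringLoop_full, hfd, hfu]
          simp only [combine]
          rw [if_pos (show c - (c - d) ≤ c + d - c by omega)]
        · rw [if_neg hq, ringLoop_pre c n S f (d + 1) (c - d) (c - d) (by omega)]
          rw [hfd, hfu_step hq]
          cases hu : firstUp S n (c + (d + 1)) with
          | none => simp [combine]
          | some s =>
            have hsb := firstUp_bounds S n (c + (d + 1)) s hu
            simp only [combine]
            rw [if_pos (show c - (c - d) ≤ s - c by omega)]
      · rw [if_neg hp]
        simp only [reduceIte]
        by_cases hq : c + d < n ∧ c + d ∉ S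
        · have hfu : firstUp S n (c + d) = some (c + d) := by
            rw [firstUp, dif_pos hq.1, if_neg hq.2]
          rw [if_pos hq, ringLoop_sub c n S f (d + 1) (c + d) (c + d) (by omega)]
          rw [hfd_step hp, hfu]
          cases hdn : firstDown S (c - (d + 1)) with
          | none => simp [combine]
          | some q =>
            have hqb := firstDown_bounds S (c - (d + 1)) q hdn
            simp only [combine]
            rw [if_neg (show ¬ c - q ≤ c + d - c by omega)]
        · rw [if_neg hq, ih (d + 1) (by omega) (by omega)]
          rw [hfd_step hp, hfu_step hq]
    · rw [if_neg hc]
      rw [firstDown_of_neg S (c - d) (by omega), firstUp_of_ge S n (c + d) (by omega)]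
      rfl

-- membership in set(marked_set) is membership in marked_set
lemma ringLoop_ofList (c n : Int) (S : List Int) (f : Nat) (d : Int) (pre sub near : Option Int) :
    ringLoop c n (PySem.Set.ofList S) f d pre sub near = ringLoop c n S f d pre sub near := by
  induction f generalizing d pre sub near with
  | zero => rfl
  | succ f ih =>
    rw [ringLoop, ringLoop]
    simp only [PySem.Set.mem_ofList]
    split
    · rw [ih]
    · rfl

-- ===== VERDICT (by name: the statement is the Claim_ definition above) =====
theorem find_nearest_reliable_annotation_spec : Claim_equal_find_nearest_reliable_annotation := by
  intro c n S _
  unfold Spec_find_nearest_reliable_annotation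
  simp only [find_nearest_reliable_annotation, find_nearest_reliable_annotation_alt]
  have hm1 : c ≤ ((max c (n - 1 - c)).toNat : Int) :=
    le_trans (le_max_left _ _) (Int.self_le_toNat _)
  have hm2 : n - 1 - c ≤ ((max c (n - 1 - c)).toNat : Int) :=
    le_trans (le_max_right _ _) (Int.self_le_toNat _)
  rw [ringLoop_ofList]
  rw [ringLoop_none c n S (ringFuel c n) 1 (by unfold ringFuel; push_cast; omega)
      (by unfold ringFuel; push_cast; omega)]
  simp only [find?_pyRange_down, find?_pyRange_up]
  cases hdn : firstDown S (c - 1) with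
  | none =>
    cases hu : firstUp S n (c + 1) with
    | none => simp [combine]
    | some s => simp [combine]
  | some p =>
    have hpb := firstDown_bounds S (c - 1) p hdn
    cases hu : firstUp S n (c + 1) with
    | none =>
      simp only [combine, Option.getD_some, Option.getD_none]
      simp [show ¬ p = -1 by omega]
    | some s =>
      have hsb := firstUp_bounds S n (c + 1) s hu
      simp only [combine, Option.getD_some]
      rw [if_neg (by omega : ¬ p = -1), if_neg (by omega : ¬ s = -1)]
      rw [abs_of_neg (by omega : p - c < 0), abs_of_pos (by omega : (0:Int) < s - c), neg_sub]
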